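-- pv_equiv track=rewrite | github.com/roadfoodr/rfadvisr | process_roadfood_book_text.py | mark_remaining_content
-- ===== SOURCE A (Python) =====
-- def mark_remaining_content(content):
--     """
--     Mark any text that isn't already enclosed in markers with |content start| and |content end|.
--     Consecutive unmarked lines (including blank lines) are combined into a single content block.
--     Only break content blocks when encountering lines with markers.
--     """
--     lines = content.split('\n')
--     processed_lines = []
--     current_content_block = []
--
--     for line in lines:
--         # If line contains markers, process any accumulated content block first
--         if '|' in line:
--             if current_content_block:
--                 # Join with newlines to preserve internal spacing
--                 combined_content = '\n'.join(current_content_block).strip()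
--                 if combined_content:
--                     processed_lines.append(f'|content start| {combined_content} |content end|')
--                 current_content_block = []
--             processed_lines.append(line)
--             continue
--
--         # Accumulate unmarked content (including blank lines)
--         current_content_block.append(line)
--
--     # Process any remaining content block at the end
--     if current_content_block:
--         combined_content = '\n'.join(current_content_block).strip()
--         if combined_content:
--             processed_lines.append(f'|content start| {combined_content} |content end|')
--
--     return '\n'.join(processed_lines)
-- ===== SOURCE B (Python) =====
-- def mark_remaining_content(content):
--     """
--     Mark any text that isn't already enclosed in markers with |content start| and |content end|.
--     Group-first traversal: scan forward over runs of unmarked lines instead of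
--     accumulating and flushing.
--     """
--     lines = content.split('\n')
--     processed_lines = []
--     i = 0
--     n = len(lines)
--     while i < n:
--         if '|' in lines[i]:
--             processed_lines.append(lines[i])
--             i += 1
--         else:
--             j = i + 1
--             while j < n and '|' not in lines[j]:
--                 j += 1
--             combined = '\n'.join(lines[i:j]).strip()
--             if combined:
--                 processed_lines.append(f'|content start| {combined} |content end|')
--             i = j
--     return '\n'.join(processed_lines)
-- ===== Notes on version B (the rewrite author's own statement) =====
-- stated objective: alternative
-- what changed: Replaced A's accumulate-and-flush loop (a pending content-block buffer flushed on marker lines and at the end) with a group-first forward scan that takes each maximal run of unmarked lines at once and emits its wrapped block directly.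
import Mathlib
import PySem

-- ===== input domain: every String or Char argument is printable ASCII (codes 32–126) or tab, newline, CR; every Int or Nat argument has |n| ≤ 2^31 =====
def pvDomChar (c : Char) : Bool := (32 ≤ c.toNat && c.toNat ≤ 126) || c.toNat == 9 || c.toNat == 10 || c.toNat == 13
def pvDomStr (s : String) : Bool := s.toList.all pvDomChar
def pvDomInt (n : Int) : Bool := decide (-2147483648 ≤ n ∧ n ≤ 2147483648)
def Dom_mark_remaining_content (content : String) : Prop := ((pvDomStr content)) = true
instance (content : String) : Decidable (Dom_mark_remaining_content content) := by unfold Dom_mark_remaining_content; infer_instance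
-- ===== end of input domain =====

-- B restructures A's accumulate-and-flush loop into a group-first forward scan; return values are proved equal on all inputs.

-- shared literal pieces (the f-string '|content start| {c} |content end|')
def pvWrap (c : List Char) : List Char :=
  "|content start| ".toList ++ c ++ " |content end|".toList

-- ===== PORT A =====
-- the 'if current_content_block: … if combined_content: …' flush of A's loop body / epilogue
def pvFlushA (cur : List (List Char)) : List (List Char) :=
  if cur = [] then []
  else
    let combined := PySem.Chars.strip (PySem.Chars.join ['\n'] cur)
    if combined = [] then [] else [pvWrap combined]

def mark_remaining_content (content : String) : String :=
  let lines := PySem.Chars.splitOn content.toList ['\n']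
  let st := lines.foldl
    (fun (st : List (List Char) × List (List Char)) line =>
      if PySem.Chars.isIn ['|'] line then
        (st.1 ++ pvFlushA st.2 ++ [line], [])
      else
        (st.1, st.2 ++ [line]))
    ([], [])
  String.ofList (PySem.Chars.join ['\n'] (st.1 ++ pvFlushA st.2))

-- ===== PORT B =====
-- B's outer while loop: emit marker lines one by one; take each maximal run of
-- unmarked lines at once (the inner j-scan = takeWhile/dropWhile) and wrap it.
def pvLoopB : List (List Char) → List (List Char)
  | [] => []
  | l :: ls =>
    if PySem.Chars.isIn ['|'] l then l :: pvLoopB ls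
    else
      let grp := l :: ls.takeWhile (fun x => !PySem.Chars.isIn ['|'] x)
      let rest := ls.dropWhile (fun x => !PySem.Chars.isIn ['|'] x)
      let combined := PySem.Chars.strip (PySem.Chars.join ['\n'] grp)
      if combined = [] then pvLoopB rest else pvWrap combined :: pvLoopB rest
  termination_by ls => ls.length
  decreasing_by
  all_goals
    have hdw := List.length_dropWhile_le (fun x => !PySem.Chars.isIn ['|'] x) ls
    simp only [List.length_cons]
    omega

def mark_remaining_content_alt (content : String) : String :=
  String.ofList (PySem.Chars.join ['\n'] (pvLoopB (PySem.Chars.splitOn content.toList ['\n'])))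

-- ===== PRECONDITION & SPEC =====
def Spec_mark_remaining_content (content : String) (out : String) : Prop := out = mark_remaining_content_alt content
instance (content : String) (out : String) : Decidable (Spec_mark_remaining_content content out) := by unfold Spec_mark_remaining_content; infer_instance

-- ===== CLAIM (what is proved, stated in full; the proofs are below) =====
def Claim_equal_mark_remaining_content : Prop := ∀ (content : String), Dom_mark_remaining_content content → Spec_mark_remaining_content content (mark_remaining_content content)

-- ===== LEMMAS AND PROOFS =====

-- A's loop body, named for the proofs
def pvStepA (st : List (List Char) × List (List Char)) (line : List Char) :
    List (List Char) × List (List Char) :=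
  if PySem.Chars.isIn ['|'] line then
    (st.1 ++ pvFlushA st.2 ++ [line], [])
  else
    (st.1, st.2 ++ [line])

-- the output list A extracts from its final state
def pvOutA (st : List (List Char) × List (List Char)) : List (List Char) :=
  st.1 ++ pvFlushA st.2

lemma pvOutA_foldl_prefix (lines : List (List Char)) :
    ∀ p cur, pvOutA (lines.foldl pvStepA (p, cur)) = p ++ pvOutA (lines.foldl pvStepA ([], cur)) := by
  induction lines with
  | nil => intro p cur; simp [pvOutA]
  | cons l ls ih =>
    intro p cur
    by_cases h : PySem.Chars.isIn ['|'] l = true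
    · simp only [List.foldl_cons, pvStepA, h, if_true]
      rw [ih (p ++ pvFlushA cur ++ [l]), ih (([] : List (List Char)) ++ pvFlushA cur ++ [l])]
      simp
    · simp only [List.foldl_cons, pvStepA, h]
      exact ih p (cur ++ [l])

lemma pvOutA_foldl_both (lines : List (List Char)) :
    (∀ cur, cur ≠ [] →
      pvOutA (lines.foldl pvStepA ([], cur)) =
        pvFlushA (cur ++ lines.takeWhile (fun x => !PySem.Chars.isIn ['|'] x)) ++
          pvLoopB (lines.dropWhile (fun x => !PySem.Chars.isIn ['|'] x))) ∧
    pvOutA (lines.foldl pvStepA ([], [])) = pvLoopB lines := by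
  induction lines with
  | nil =>
    constructor
    · intro cur _; simp [pvOutA, pvLoopB]
    · simp [pvOutA, pvFlushA, pvLoopB]
  | cons l ls ih =>
    obtain ⟨ihblock, ihmain⟩ := ih
    by_cases h : PySem.Chars.isIn ['|'] l = true
    · constructor
      · intro cur hcur
        simp only [List.foldl_cons, pvStepA, h, if_true, List.takeWhile_cons,
          List.dropWhile_cons, Bool.not_true]
        rw [pvOutA_foldl_prefix, ihmain]
        simp [pvLoopB, h]
      · simp only [List.foldl_cons, pvStepA, h, if_true]
        rw [pvOutA_foldl_prefix, ihmain]
        simp [pvLoopB, h, pvFlushA]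
    · have hstep : ∀ cur : List (List Char),
          (l :: ls).foldl pvStepA ([], cur) = ls.foldl pvStepA ([], cur ++ [l]) := by
        intro cur; simp [pvStepA, h]
      constructor
      · intro cur hcur
        rw [hstep, ihblock (cur ++ [l]) (by simp)]
        simp [h]
      · have h0 := hstep []
        simp only [List.nil_append] at h0
        rw [h0, ihblock [l] (by simp)]
        simp only [List.singleton_append]
        by_cases hc : PySem.Chars.strip (PySem.Chars.join ['\n']
            (l :: List.takeWhile (fun x => !PySem.Chars.isIn ['|'] x) ls)) = [] <;>
          simp [pvLoopB, h, pvFlushA, hc]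

lemma pvOutA_foldl_main (lines : List (List Char)) :
    pvOutA (lines.foldl pvStepA ([], [])) = pvLoopB lines :=
  (pvOutA_foldl_both lines).2

-- ===== VERDICT (by name: the statement is the Claim_ definition above) =====
theorem mark_remaining_content_spec : Claim_equal_mark_remaining_content := by
  intro content _
  unfold Spec_mark_remaining_content mark_remaining_content mark_remaining_content_alt
  show String.ofList (PySem.Chars.join ['\n']
      (pvOutA ((PySem.Chars.splitOn content.toList ['\n']).foldl pvStepA ([], [])))) = _
  rw [pvOutA_foldl_main]
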